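-- pv_equiv track=rewrite | github.com/LowLevelLore/LPW | GT/prufer_to_tree.py | verify_prufer
-- ===== SOURCE A (Python) =====
-- from collections import Counter
--
-- def verify_prufer(
--     tree: dict[int, set[int]] = {1: {2}, 2: {1, 3, 4}, 3: {2}, 4: {2, 5}, 5: {4}},
--     prufer_code=list[int],
-- ) -> bool:
--     if len(prufer_code) == len(tree) - 2:
--         leaf_vertices = []
--         degree_pairs = {}
--         for k in tree:
--             if len(tree[k]) == 1:
--                 leaf_vertices.append(k)
--             else:
--                 degree_pairs[k] = len(tree[k])
--         count = dict(Counter(prufer_code))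
--         for vertex in leaf_vertices:
--             if vertex in prufer_code:
--                 return False
--         for vertex in count:
--             try:
--                 if count[vertex] != degree_pairs[vertex] - 1:
--                     return False
--             except KeyError:
--                 return False
--         return True
--     else:
--         return False
-- ===== SOURCE B (Python) =====
-- from collections import Counter
--
--
-- def verify_prufer(
--     tree={1: {2}, 2: {1, 3, 4}, 3: {2}, 4: {2, 5}, 5: {4}},
--     prufer_code=list[int],
-- ):
--     if len(prufer_code) != len(tree) - 2:
--         return False
--     for v, c in Counter(prufer_code).items():
--         if v not in tree or len(tree[v]) != c + 1:
--             return False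
--     return True
-- ===== Notes on version B (the rewrite author's own statement) =====
-- stated objective: simpler
-- what changed: B drops A's precomputed leaf-vertex list, non-leaf degree index and its two separate checking loops (one of which scans the whole prufer list per leaf), and instead makes a single pass over Counter(prufer_code).items(), checking each distinct prufer vertex directly against the tree dict (degree == count + 1).
import Mathlib
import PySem

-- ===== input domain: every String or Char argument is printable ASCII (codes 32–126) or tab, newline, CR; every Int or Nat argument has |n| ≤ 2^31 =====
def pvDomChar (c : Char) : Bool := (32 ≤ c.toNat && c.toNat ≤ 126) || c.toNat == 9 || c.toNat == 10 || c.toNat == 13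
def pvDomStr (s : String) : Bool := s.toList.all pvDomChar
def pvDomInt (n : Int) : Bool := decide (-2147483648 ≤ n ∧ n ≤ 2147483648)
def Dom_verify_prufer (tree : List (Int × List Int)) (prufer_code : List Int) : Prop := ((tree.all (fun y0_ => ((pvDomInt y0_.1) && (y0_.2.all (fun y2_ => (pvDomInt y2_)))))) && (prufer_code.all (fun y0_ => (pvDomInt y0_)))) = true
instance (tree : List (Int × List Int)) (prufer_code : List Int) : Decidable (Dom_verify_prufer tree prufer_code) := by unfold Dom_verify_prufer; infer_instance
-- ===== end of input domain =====

-- B replaces A's leaf list + non-leaf degree index and its two separate checking loops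
-- with one pass over Counter(prufer_code).items() querying the tree dict directly (objective: simpler).

-- ===== PORT A =====
-- shared input adapter: the Python argument is a dict[int, set[int]]; the association list
-- is converted exactly as Python's dict/set construction would (overwrite keeps position, sets dedup)
def pvToTree (tree : List (Int × List Int)) : PySem.Dict Int (PySem.Set Int) :=
  PySem.Dict.ofList (tree.map (fun p => (p.1, PySem.Set.ofList p.2)))

-- body of A's first loop: collect leaf vertices, index non-leaf degrees
def pruferStep (acc : List Int × PySem.Dict Int Int) (kv : Int × PySem.Set Int) :
    List Int × PySem.Dict Int Int :=
  if kv.2.length = 1 then (acc.1 ++ [kv.1], acc.2)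
  else (acc.1, acc.2.insert kv.1 (kv.2.length : Int))

def verify_prufer (tree : List (Int × List Int)) (prufer_code : List Int) : Bool :=
  let t := pvToTree tree
  if (prufer_code.length : Int) = (t.size : Int) - 2 then
    let acc := t.items.foldl pruferStep ([], PySem.Dict.empty)
    let count := PySem.Dict.counter prufer_code
    if acc.1.any (fun v => prufer_code.contains v) then false
    else if count.items.any (fun kv =>
        match acc.2.get? kv.1 with
        | none => true                      -- KeyError branch: return False
        | some d => kv.2 != d - 1) then false
    else true
  else false

-- ===== PORT B =====
def verify_prufer_alt (tree : List (Int × List Int)) (prufer_code : List Int) : Bool :=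
  let t := pvToTree tree
  if (prufer_code.length : Int) ≠ (t.size : Int) - 2 then false
  else (PySem.Dict.counter prufer_code).items.all (fun kv =>
    match t.get? kv.1 with
    | none => false
    | some s => (s.length : Int) == kv.2 + 1)

-- ===== PRECONDITION & SPEC =====
def Spec_verify_prufer (tree : List (Int × List Int)) (prufer_code : List Int) (out : Bool) : Prop := out = verify_prufer_alt tree prufer_code
instance (tree : List (Int × List Int)) (prufer_code : List Int) (out : Bool) : Decidable (Spec_verify_prufer tree prufer_code out) := by unfold Spec_verify_prufer; infer_instance

-- ===== CLAIM (what is proved, stated in full; the proofs are below) =====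
def Claim_equal_verify_prufer : Prop := ∀ (tree : List (Int × List Int)) (prufer_code : List Int), Dom_verify_prufer tree prufer_code → Spec_verify_prufer tree prufer_code (verify_prufer tree prufer_code)

-- ===== LEMMAS AND PROOFS =====

theorem fold_fst (l : List (Int × PySem.Set Int)) (a : List Int) (d : PySem.Dict Int Int) :
    (l.foldl pruferStep (a, d)).1
      = a ++ (l.filter (fun kv => kv.2.length == 1)).map (·.1) := by
  induction l generalizing a d with
  | nil => simp
  | cons kv rest ih =>
    by_cases h : kv.2.length = 1 <;>
      simp [pruferStep, h, ih]

theorem fold_snd_get (l : List (Int × PySem.Set Int)) (a : List Int) (d : PySem.Dict Int Int)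
    (hnd : (l.map (·.1)).Nodup) (hfresh : ∀ kv ∈ l, d.contains kv.1 = false) (v : Int) :
    (l.foldl pruferStep (a, d)).2.get? v =
      match l.find? (fun kv => kv.1 == v) with
      | some kv => if kv.2.length = 1 then d.get? v else some (kv.2.length : Int)
      | none => d.get? v := by
  induction l generalizing a d with
  | nil => simp
  | cons kv rest ih =>
    obtain ⟨k, s⟩ := kv
    simp only [List.map_cons, List.nodup_cons] at hnd
    obtain ⟨hk, hnd'⟩ := hnd
    have hknotin : ∀ kv ∈ rest, kv.1 ≠ k := by
      intro kv hm he
      exact hk (he ▸ List.mem_map_of_mem hm)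
    have hrestnone : k ∉ rest.map (·.1) → rest.find? (fun kv => kv.1 == k) = none := by
      intro _
      apply List.find?_eq_none.mpr
      intro kv hm
      simp [hknotin kv hm]
    rw [List.foldl_cons]
    by_cases hkv : k = v
    · subst hkv
      by_cases hlen : s.length = 1
      · have hstep : pruferStep (a, d) (k, s) = (a ++ [k], d) := by simp [pruferStep, hlen]
        rw [hstep, ih _ _ hnd' (fun kv hm => hfresh kv (by simp [hm])), hrestnone hk]
        simp [hlen]
      · have hstep : pruferStep (a, d) (k, s) = (a, d.insert k (s.length : Int)) := by
          simp [pruferStep, hlen]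
        have hfresh' : ∀ kv ∈ rest, (d.insert k (s.length : Int)).contains kv.1 = false := by
          intro kv hm
          rw [PySem.Dict.contains_insert]
          simp [hknotin kv hm, hfresh kv (by simp [hm])]
        rw [hstep, ih _ _ hnd' hfresh', hrestnone hk]
        simp [hlen, PySem.Dict.get?_insert_self]
    · have hgv : ∀ (w : Int), (d.insert k w).get? v = d.get? v := fun w =>
        PySem.Dict.get?_insert_of_ne d w (Ne.symm hkv)
      by_cases hlen : s.length = 1
      · have hstep : pruferStep (a, d) (k, s) = (a ++ [k], d) := by simp [pruferStep, hlen]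
        rw [hstep, ih _ _ hnd' (fun kv hm => hfresh kv (by simp [hm]))]
        simp [hkv]
      · have hstep : pruferStep (a, d) (k, s) = (a, d.insert k (s.length : Int)) := by
          simp [pruferStep, hlen]
        have hfresh' : ∀ kv ∈ rest, (d.insert k (s.length : Int)).contains kv.1 = false := by
          intro kv hm
          rw [PySem.Dict.contains_insert]
          simp [hknotin kv hm, hfresh kv (by simp [hm])]
        rw [hstep, ih _ _ hnd' hfresh']
        cases hf : rest.find? (fun kv => kv.1 == v) with
        | none => simp [hkv, hf, hgv]
        | some kv' => simp [hkv, hf, hgv]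

theorem dp_get (t : PySem.Dict Int (PySem.Set Int)) (hnd : t.keys.Nodup) (v : Int) :
    (t.items.foldl pruferStep ([], PySem.Dict.empty)).2.get? v =
      match t.get? v with
      | some s => if s.length = 1 then none else some (s.length : Int)
      | none => none := by
  have hnd' : (t.items.map (·.1)).Nodup := hnd
  rw [fold_snd_get _ _ _ hnd' (by simp) v]
  cases hf : t.items.find? (fun kv => kv.1 == v) with
  | none =>
    have hnm : v ∉ t.keys := by
      intro hm
      obtain ⟨kv, hkv, he⟩ := List.mem_map.mp hm
      have := List.find?_eq_none.mp hf kv hkv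
      simp [he] at this
    have : t.get? v = none := (PySem.Dict.get?_eq_none_iff_not_mem_keys t v).mpr hnm
    simp [this]
  | some kv =>
    have h1 : kv ∈ t.items := List.mem_of_find?_eq_some hf
    have h2 : kv.1 = v := by simpa using List.find?_some hf
    have hg : t.get? v = some kv.2 := by
      have : (kv.1, kv.2) ∈ t.items := by simpa using h1
      simpa [h2] using PySem.Dict.get?_of_mem_items t this hnd
    simp [hg]

theorem leaves_mem (t : PySem.Dict Int (PySem.Set Int)) (hnd : t.keys.Nodup) (v : Int) :
    (v ∈ (t.items.foldl pruferStep ([], PySem.Dict.empty)).1) ↔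
      ∃ s, t.get? v = some s ∧ s.length = 1 := by
  rw [fold_fst]
  simp only [List.nil_append, List.mem_map, List.mem_filter, beq_iff_eq]
  constructor
  · rintro ⟨⟨k, s⟩, ⟨hm, hlen⟩, rfl⟩
    exact ⟨s, PySem.Dict.get?_of_mem_items t hm hnd, hlen⟩
  · rintro ⟨s, hg, hlen⟩
    exact ⟨(v, s), ⟨PySem.Dict.mem_items_of_get?_eq_some t hg, hlen⟩, rfl⟩

theorem count_mem_items (prufer : List Int) (kv : Int × Int)
    (h : kv ∈ (PySem.Dict.counter prufer).items) :
    kv.1 ∈ prufer ∧ kv.2 = (prufer.count kv.1 : Int) ∧ 1 ≤ kv.2 := by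
  rw [PySem.Dict.items_counter] at h
  obtain ⟨v, hv, he⟩ := List.mem_map.mp h
  have hvm : v ∈ prufer := (PySem.Set.mem_ofList prufer v).mp hv
  have hc : 0 < prufer.count v := List.count_pos_iff.mpr hvm
  subst he
  refine ⟨hvm, rfl, ?_⟩
  show (1 : Int) ≤ (prufer.count v : Int)
  exact_mod_cast hc

theorem verify_prufer_spec : Claim_equal_verify_prufer := by
  intro tree prufer _
  unfold Spec_verify_prufer verify_prufer verify_prufer_alt
  have hnd : (pvToTree tree).keys.Nodup := PySem.Dict.nodup_keys_ofList _
  set t := pvToTree tree with ht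
  by_cases hlen : (prufer.length : Int) = (t.size : Int) - 2
  case neg => simp [hlen]
  case pos =>
    rw [if_pos hlen, if_neg (not_not_intro hlen)]
    dsimp only
    set dp := (t.items.foldl pruferStep ([], PySem.Dict.empty)).2 with hdp
    set L := (t.items.foldl pruferStep ([], PySem.Dict.empty)).1 with hL
    split_ifs with h1 h2
    · -- a leaf occurs in the prufer code: B's pass also rejects
      symm
      obtain ⟨v, hvL, hvp⟩ := List.any_eq_true.mp h1
      have hvp : v ∈ prufer := by simpa using hvp
      obtain ⟨s, hg, hlen1⟩ := (leaves_mem t hnd v).mp hvL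
      apply List.all_eq_false.mpr
      refine ⟨(v, (prufer.count v : Int)), ?_, ?_⟩
      · rw [PySem.Dict.items_counter]
        exact List.mem_map.mpr ⟨v, (PySem.Set.mem_ofList prufer v).mpr hvp, rfl⟩
      · have hc : 0 < prufer.count v := List.count_pos_iff.mpr hvp
        simp only [hg, hlen1]
        simp
        omega
    · -- A's count/degree loop rejects: B's pass rejects at the same vertex
      symm
      obtain ⟨kv, hkv, hPA⟩ := List.any_eq_true.mp h2
      obtain ⟨hv, hc, hc1⟩ := count_mem_items prufer kv hkv
      apply List.all_eq_false.mpr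
      refine ⟨kv, hkv, ?_⟩
      rw [hdp, dp_get t hnd kv.1] at hPA
      cases hg : t.get? kv.1 with
      | none => simp
      | some s =>
        rw [hg] at hPA
        dsimp only at hPA
        by_cases hl1 : s.length = 1
        · simp only [hl1]
          simp
          omega
        · rw [if_neg hl1] at hPA
          simp only at hPA
          have : kv.2 ≠ (s.length : Int) - 1 := by simpa using hPA
          simp
          omega
    · -- both loops pass: every distinct prufer vertex has the matching degree
      symm
      apply List.all_eq_true.mpr
      intro kv hkv
      obtain ⟨hv, hc, hc1⟩ := count_mem_items prufer kv hkv
      have hPA := List.any_eq_false.mp (Bool.of_not_eq_true h2) kv hkv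
      rw [hdp, dp_get t hnd kv.1] at hPA
      cases hg : t.get? kv.1 with
      | none => rw [hg] at hPA; simp at hPA
      | some s =>
        rw [hg] at hPA
        dsimp only at hPA
        by_cases hl1 : s.length = 1
        · rw [if_pos hl1] at hPA
          simp at hPA
        · rw [if_neg hl1] at hPA
          have : kv.2 = (s.length : Int) - 1 := by simpa using hPA
          simp
          omega
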